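-- pv_equiv track=rewrite | github.com/Syed-Ammad/PolyMentor | src/models/common_rules.py | contains_null_check
-- ===== SOURCE A (Python) =====
-- from typing import Dict, Optional, List, Tuple
--
-- def contains_null_check(lines: List[str], variable: str, line_num: int) -> bool:
--     """Check if variable is checked for null/None in surrounding lines."""
--     start_check = max(0, line_num - 4)
--     end_check = min(len(lines), line_num + 3)
--
--     for i in range(start_check, end_check):
--         line = lines[i].lower()
--         if any(check in line for check in [
--             f'{variable.lower()} is none', f'{variable.lower()} == none',
--             f'{variable.lower()} is null', f'{variable.lower()} == null',
--             f'{variable.lower()} is not none', f'{variable.lower()} != none',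
--             f'{variable.lower()} is not null', f'{variable.lower()} != null'
--         ]):
--             return True
--     return False
-- ===== SOURCE B (Python) =====
-- def contains_null_check(lines, variable, line_num):
--     """Check if variable is checked for null/None in surrounding lines."""
--     v = variable.lower()
--     ops = (' is ', ' == ', ' is not ', ' != ')
--     start = max(0, line_num - 4)
--     end = max(0, min(len(lines), line_num + 3))
--     for line in lines[start:end]:
--         low = line.lower()
--         # anchor on the null literal, then verify backwards: operator, then variable
--         for j in range(len(low)):
--             if low[j:j + 4] in ('none', 'null'):
--                 for op in ops:
--                     k = j - len(op)
--                     if k >= 0 and low[k:j] == op and low[:k].endswith(v):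
--                         return True
--     return False
-- ===== Notes on version B (the rewrite author's own statement) =====
-- stated objective: alternative
-- what changed: Instead of building eight 'variable+op+null' needles and running a full substring search for each, B anchors on the rare constant 4-char literal ('none'/'null'): it scans each window line once for that literal and, at each hit, verifies backwards that one of the four operators and then the lowercased variable immediately precede it.
import Mathlib
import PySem

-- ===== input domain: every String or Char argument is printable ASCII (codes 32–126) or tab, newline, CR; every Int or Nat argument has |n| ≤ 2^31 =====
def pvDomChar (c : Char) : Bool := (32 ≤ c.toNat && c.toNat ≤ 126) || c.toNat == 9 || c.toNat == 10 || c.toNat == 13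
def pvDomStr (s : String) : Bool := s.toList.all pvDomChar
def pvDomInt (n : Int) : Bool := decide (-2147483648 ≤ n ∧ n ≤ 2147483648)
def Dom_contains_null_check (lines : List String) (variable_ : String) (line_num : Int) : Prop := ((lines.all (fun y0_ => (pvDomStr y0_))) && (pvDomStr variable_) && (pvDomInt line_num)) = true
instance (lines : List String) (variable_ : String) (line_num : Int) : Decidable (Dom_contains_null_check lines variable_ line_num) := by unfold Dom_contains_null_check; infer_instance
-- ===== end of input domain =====

-- B searches each window line for the constant 4-char literal 'none'/'null' and verifies the
-- operator and the variable backwards from each hit, instead of A's eight forward needle searches;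
-- objective: alternative (a different algorithm of similar cost).

-- ===== PORT A =====
-- the eight f-string check strings, in A's order
def pvChecks (v : List Char) : List (List Char) :=
  [v ++ " is none".toList, v ++ " == none".toList,
   v ++ " is null".toList, v ++ " == null".toList,
   v ++ " is not none".toList, v ++ " != none".toList,
   v ++ " is not null".toList, v ++ " != null".toList]

-- A's loop body: line = lines[i].lower(); any(check in line for check in [...])
def pvCheckLine (variable_ : String) (s : String) : Bool :=
  let line := PySem.Chars.lower s.toList
  (pvChecks (PySem.Chars.lower variable_.toList)).any (fun check => PySem.Chars.isIn check line)

def contains_null_check (lines : List String) (variable_ : String) (line_num : Int) : Bool :=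
  let start_check : Int := max 0 (line_num - 4)
  let end_check : Int := min (PySem.List.len lines) (line_num + 3)
  (PySem.List.pyRange start_check end_check 1).any (fun i =>
    match PySem.List.pyGet? lines i with
    | some s => pvCheckLine variable_ s
    | none => false)   -- dead branch: every i in the range is a valid index into lines

-- ===== PORT B =====
-- the two null literals and the four operators, as in Source B
def pvNulls : List (List Char) := ["none".toList, "null".toList]
def pvOps : List (List Char) := [" is ".toList, " == ".toList, " is not ".toList, " != ".toList]

-- Source B's per-line anchor scan: for j in range(len(low)): if low[j:j+4] in ('none','null'):
--   for op in ops: k = j - len(op); if k >= 0 and low[k:j] == op and low[:k].endswith(v): True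
-- (low[j:j+4] = (low.drop j).take 4 and low[k:j] = (low.take j).drop k exactly, since 0 ≤ k ≤ j;
--  Python's 'k >= 0' on the int j - len(op) is the guard op.length ≤ j, and then k = j - op.length)
def pvAnchorScan (v low : List Char) : Bool :=
  (List.range low.length).any (fun j =>
    pvNulls.any (fun nul => (low.drop j).take 4 == nul) &&
    pvOps.any (fun op =>
      decide (op.length ≤ j) &&
      ((low.take j).drop (j - op.length) == op) &&
      PySem.Chars.endswith (low.take (j - op.length)) v))

def contains_null_check_alt (lines : List String) (variable_ : String) (line_num : Int) : Bool :=
  let v := PySem.Chars.lower variable_.toList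
  let start : Int := max 0 (line_num - 4)
  let stop : Int := max 0 (min (PySem.List.len lines) (line_num + 3))
  (PySem.List.slice lines (some start) (some stop)).any (fun line =>
    pvAnchorScan v (PySem.Chars.lower line.toList))

-- ===== PRECONDITION & SPEC =====
def Spec_contains_null_check (lines : List String) (variable_ : String) (line_num : Int) (out : Bool) : Prop := out = contains_null_check_alt lines variable_ line_num
instance (lines : List String) (variable_ : String) (line_num : Int) (out : Bool) : Decidable (Spec_contains_null_check lines variable_ line_num out) := by unfold Spec_contains_null_check; infer_instance

-- ===== CLAIM (what is proved, stated in full; the proofs are below) =====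
def Claim_equal_contains_null_check : Prop := ∀ (lines : List String) (variable_ : String) (line_num : Int), Dom_contains_null_check lines variable_ line_num → Spec_contains_null_check lines variable_ line_num (contains_null_check lines variable_ line_num)

-- ===== LEMMAS AND PROOFS =====

-- (v ++ t) is a prefix of s iff v is a prefix and t follows it
lemma pv_append_prefix (v t s : List Char) :
    (v ++ t) <+: s ↔ v <+: s ∧ t <+: s.drop v.length := by
  constructor
  · rintro ⟨r, rfl⟩
    refine ⟨⟨t ++ r, by simp⟩, ?_⟩
    rw [List.append_assoc, List.drop_left]
    exact ⟨r, rfl⟩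
  · rintro ⟨⟨u, rfl⟩, ht⟩
    rw [List.drop_left] at ht
    exact (List.prefix_append_right_inj v).mpr ht

-- occurrence of v ++ op ++ nul somewhere in low ⟺ B's anchored conditions at the anchor j
lemma pv_occ (v op nul low : List Char) (h4 : nul.length = 4) :
    (∃ i, (v ++ (op ++ nul)) <+: low.drop i) ↔
    ∃ j, j < low.length ∧ (low.drop j).take 4 = nul ∧ op.length ≤ j ∧
      (low.take j).drop (j - op.length) = op ∧ v <:+ low.take (j - op.length) := by
  constructor
  · rintro ⟨i, hp⟩
    rw [pv_append_prefix, pv_append_prefix] at hp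
    obtain ⟨hv, hop, hn⟩ := hp
    have hn' : nul <+: low.drop (i + v.length + op.length) := by
      rw [List.drop_drop, List.drop_drop] at hn
      convert hn using 2
      omega
    have hop' : op <+: low.drop (i + v.length) := by
      rw [List.drop_drop] at hop
      exact hop
    set j := i + v.length + op.length with hj
    obtain ⟨r, hr⟩ := hn'
    have hjlt : j < low.length := by
      have hlen := congrArg List.length hr
      simp [List.length_drop, h4] at hlen
      omega
    refine ⟨j, hjlt, ?_, by omega, ?_, ?_⟩
    · rw [← hr, ← h4, List.take_left]
    · have hk : j - op.length = i + v.length := by omega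
      rw [hk, List.drop_take]
      have h2 : j - (i + v.length) = op.length := by omega
      rw [h2]
      obtain ⟨r2, hr2⟩ := hop'
      rw [← hr2, List.take_left]
    · have hk : j - op.length = i + v.length := by omega
      rw [hk, List.take_add]
      obtain ⟨r3, hr3⟩ := hv
      rw [← hr3, List.take_left]
      exact ⟨low.take i, rfl⟩
  · rintro ⟨j, hjlt, hnul4, hople, hopseg, hvsuf⟩
    obtain ⟨pre, hpre⟩ := hvsuf
    set m := j - op.length with hm
    have hmlen : (low.take m).length = m := by
      rw [List.length_take]; omega
    have hvm : v.length ≤ m := by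
      have h := congrArg List.length hpre
      simp [hmlen] at h
      omega
    have hprelen : pre.length = m - v.length := by
      have h := congrArg List.length hpre
      simp [hmlen] at h
      omega
    set i := m - v.length with hi
    refine ⟨i, ?_⟩
    rw [pv_append_prefix, pv_append_prefix]
    have hdropi : low.drop i = v ++ low.drop m := by
      conv_lhs => rw [← List.take_append_drop m low]
      rw [List.drop_append_of_le_length (by rw [hmlen]; omega)]
      rw [← hpre, ← hprelen, List.drop_left]
    refine ⟨⟨low.drop m, hdropi.symm⟩, ?_, ?_⟩
    · have h1 : (low.drop i).drop v.length = low.drop m := by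
        rw [List.drop_drop]
        congr 1
        omega
      rw [h1]
      rw [List.drop_take] at hopseg
      rw [show j - m = op.length from by omega] at hopseg
      rw [List.prefix_iff_eq_take]
      exact hopseg.symm
    · have h1 : ((low.drop i).drop v.length).drop op.length = low.drop j := by
        rw [List.drop_drop, List.drop_drop]
        congr 1
        omega
      rw [h1, List.prefix_iff_eq_take, h4]
      exact hnul4.symm

-- A's eight check strings are exactly v ++ op ++ nul over the op/nul tables
lemma pv_checks_mem (v c : List Char) :
    c ∈ pvChecks v ↔ ∃ op ∈ pvOps, ∃ nul ∈ pvNulls, c = v ++ (op ++ nul) := by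
  simp only [pvChecks, pvOps, pvNulls,
    show (" is none".toList : List Char) = " is ".toList ++ "none".toList from by decide,
    show (" == none".toList : List Char) = " == ".toList ++ "none".toList from by decide,
    show (" is null".toList : List Char) = " is ".toList ++ "null".toList from by decide,
    show (" == null".toList : List Char) = " == ".toList ++ "null".toList from by decide,
    show (" is not none".toList : List Char) = " is not ".toList ++ "none".toList from by decide,
    show (" != none".toList : List Char) = " != ".toList ++ "none".toList from by decide,
    show (" is not null".toList : List Char) = " is not ".toList ++ "null".toList from by decide,
    show (" != null".toList : List Char) = " != ".toList ++ "null".toList from by decide,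
    List.mem_cons, List.not_mem_nil, or_false]
  constructor
  · rintro (rfl | rfl | rfl | rfl | rfl | rfl | rfl | rfl)
    · exact ⟨" is ".toList, Or.inl rfl, "none".toList, Or.inl rfl, rfl⟩
    · exact ⟨" == ".toList, Or.inr (Or.inl rfl), "none".toList, Or.inl rfl, rfl⟩
    · exact ⟨" is ".toList, Or.inl rfl, "null".toList, Or.inr (rfl), rfl⟩
    · exact ⟨" == ".toList, Or.inr (Or.inl rfl), "null".toList, Or.inr (rfl), rfl⟩
    · exact ⟨" is not ".toList, Or.inr (Or.inr (Or.inl rfl)), "none".toList, Or.inl rfl, rfl⟩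
    · exact ⟨" != ".toList, Or.inr (Or.inr (Or.inr (rfl))), "none".toList, Or.inl rfl, rfl⟩
    · exact ⟨" is not ".toList, Or.inr (Or.inr (Or.inl rfl)), "null".toList, Or.inr (rfl), rfl⟩
    · exact ⟨" != ".toList, Or.inr (Or.inr (Or.inr (rfl))), "null".toList, Or.inr (rfl), rfl⟩
  · rintro ⟨op, hop, nul, hnul, rfl⟩
    rcases hop with rfl | rfl | rfl | rfl <;> rcases hnul with rfl | rfl
    · exact Or.inl rfl
    · exact Or.inr (Or.inr (Or.inl rfl))
    · exact Or.inr (Or.inl rfl)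
    · exact Or.inr (Or.inr (Or.inr (Or.inl rfl)))
    · exact Or.inr (Or.inr (Or.inr (Or.inr (Or.inl rfl))))
    · exact Or.inr (Or.inr (Or.inr (Or.inr (Or.inr (Or.inr (Or.inl rfl))))))
    · exact Or.inr (Or.inr (Or.inr (Or.inr (Or.inr (Or.inl rfl)))))
    · exact Or.inr (Or.inr (Or.inr (Or.inr (Or.inr (Or.inr (Or.inr (rfl)))))))

-- per-line equivalence: A's eight substring tests ⟺ B's anchor scan
lemma pv_line (v low : List Char) :
    (pvChecks v).any (fun check => PySem.Chars.isIn check low) = pvAnchorScan v low := by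
  rw [Bool.eq_iff_iff]
  simp only [pvAnchorScan, List.any_eq_true, List.mem_range, Bool.and_eq_true, beq_iff_eq,
    decide_eq_true_eq, PySem.Chars.endswith_iff]
  constructor
  · rintro ⟨c, hc, hin⟩
    rw [pv_checks_mem] at hc
    obtain ⟨op, hop, nul, hnul, rfl⟩ := hc
    rw [← PySem.Chars.exists_prefix_drop_iff_isIn] at hin
    have h4 : nul.length = 4 := by
      simp only [pvNulls, List.mem_cons, List.not_mem_nil, or_false] at hnul
      rcases hnul with rfl | rfl <;> decide
    obtain ⟨j, hjlt, ha, hb, hc', hd⟩ := (pv_occ v op nul low h4).mp hin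
    exact ⟨j, hjlt, ⟨nul, hnul, ha⟩, op, hop, ⟨hb, hc'⟩, hd⟩
  · rintro ⟨j, hjlt, ⟨nul, hnul, ha⟩, op, hop, ⟨hb, hc'⟩, hd⟩
    have h4 : nul.length = 4 := by
      simp only [pvNulls, List.mem_cons, List.not_mem_nil, or_false] at hnul
      rcases hnul with rfl | rfl <;> decide
    refine ⟨v ++ (op ++ nul), (pv_checks_mem v _).mpr ⟨op, hop, nul, hnul, rfl⟩, ?_⟩
    rw [← PySem.Chars.exists_prefix_drop_iff_isIn]
    exact (pv_occ v op nul low h4).mpr ⟨j, hjlt, ha, hb, hc', hd⟩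

-- window equivalence: A's index-range loop over pyGet? equals B's slice loop
lemma pv_window (xs : List String) (f : String → Bool) (a b : Int) (ha : 0 ≤ a)
    (hb : b ≤ (xs.length : Int)) :
    (PySem.List.pyRange a b 1).any (fun i =>
      match PySem.List.pyGet? xs i with
      | some s => f s
      | none => false) =
    (PySem.List.slice xs (some a) (some (max 0 b))).any f := by
  rw [Bool.eq_iff_iff]
  rw [PySem.List.slice_toNat xs ha (le_max_left 0 b)]
  simp only [List.any_eq_true, PySem.List.mem_pyRange_one]
  constructor
  · rintro ⟨i, ⟨hai, hib⟩, hf⟩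
    have h0 : 0 ≤ i := le_trans ha hai
    have hilen : i.toNat < xs.length := by omega
    have hcast : i = ((i.toNat : Nat) : Int) := by omega
    have hg : PySem.List.pyGet? xs i = xs[i.toNat]? := by
      conv_lhs => rw [hcast]
      exact PySem.List.pyGet?_natCast xs i.toNat
    rw [hg, List.getElem?_eq_getElem hilen] at hf
    refine ⟨xs[i.toNat], ?_, hf⟩
    rw [List.mem_iff_getElem]
    have hk : i.toNat - a.toNat < ((xs.drop a.toNat).take ((max 0 b).toNat - a.toNat)).length := by
      simp [List.length_take, List.length_drop]; omega
    refine ⟨i.toNat - a.toNat, hk, ?_⟩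
    rw [List.getElem_take, List.getElem_drop]
    congr 1
    omega
  · rintro ⟨x, hx, hf⟩
    rw [List.mem_iff_getElem] at hx
    obtain ⟨k, hk, rfl⟩ := hx
    have hk' : k < (max 0 b).toNat - a.toNat ∧ a.toNat + k < xs.length := by
      simp [List.length_take, List.length_drop] at hk; omega
    refine ⟨(a.toNat + k : Nat), ⟨by omega, by omega⟩, ?_⟩
    rw [PySem.List.pyGet?_natCast, List.getElem?_eq_getElem hk'.2]
    rw [List.getElem_take, List.getElem_drop] at hf
    exact hf

-- ===== VERDICT (by name: the statement is the Claim_ definition above) =====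
theorem contains_null_check_spec : Claim_equal_contains_null_check := by
  intro lines variable_ line_num _hdom
  unfold Spec_contains_null_check
  simp only [contains_null_check, contains_null_check_alt]
  rw [pv_window lines (pvCheckLine variable_) _ _ (le_max_left 0 (line_num - 4))
    (by simp [PySem.List.len_eq])]
  congr 1
  funext s
  simpa [pvCheckLine] using
    pv_line (PySem.Chars.lower variable_.toList) (PySem.Chars.lower s.toList)
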